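-- pv_equiv track=rewrite | github.com/shatayu/SportsClips | nfl_highlight_extractor.py | compute_game_elapsed
-- ===== SOURCE A (Python) =====
-- from typing import Dict, List, Optional, Tuple
--
-- def quarter_order(quarter: str) -> int:
--     if quarter == "OT":
--         return 5
--     if quarter and quarter.startswith("Q") and len(quarter) == 2 and quarter[1] in "1234":
--         return int(quarter[1])
--     return 0
--
-- def quarter_duration_seconds(quarter: str) -> int:
--     if quarter == "OT":
--         # NFL OT period commonly 10 minutes in regular season
--         return 10 * 60
--     return 15 * 60
--
-- def compute_game_elapsed(quarter: Optional[str], game_clock_sec: Optional[int]) -> Optional[int]: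
--     if not quarter or game_clock_sec is None:
--         return None
--     q_idx = quarter_order(quarter)
--     if q_idx == 0:
--         return None
--     # Elapsed up to start of this quarter
--     elapsed_prior = 0
--     for i in range(1, q_idx):
--         elapsed_prior += quarter_duration_seconds(f"Q{i}")
--     elapsed_this = quarter_duration_seconds(quarter) - game_clock_sec
--     return elapsed_prior + max(0, elapsed_this)
-- ===== SOURCE B (Python) =====
-- def compute_game_elapsed(quarter, game_clock_sec):
--     if not quarter or game_clock_sec is None:
--         return None
--     if quarter == "OT":
--         q_idx, dur = 5, 10 * 60
--     elif len(quarter) == 2 and quarter[0] == "Q" and quarter[1] in "1234":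
--         q_idx, dur = int(quarter[1]), 15 * 60
--     else:
--         return None
--     return (q_idx - 1) * 15 * 60 + max(0, dur - game_clock_sec)
-- ===== Notes on version B (the rewrite author's own statement) =====
-- stated objective: simpler
-- what changed: Replaces the helper-based dispatch (quarter_order, quarter_duration_seconds, and a loop summing the durations of prior quarters) with a single inline classification of the quarter and the closed form (q_idx - 1) * 900 for prior elapsed time, valid because every prior period is a regular 15-minute quarter.
import Mathlib
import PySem

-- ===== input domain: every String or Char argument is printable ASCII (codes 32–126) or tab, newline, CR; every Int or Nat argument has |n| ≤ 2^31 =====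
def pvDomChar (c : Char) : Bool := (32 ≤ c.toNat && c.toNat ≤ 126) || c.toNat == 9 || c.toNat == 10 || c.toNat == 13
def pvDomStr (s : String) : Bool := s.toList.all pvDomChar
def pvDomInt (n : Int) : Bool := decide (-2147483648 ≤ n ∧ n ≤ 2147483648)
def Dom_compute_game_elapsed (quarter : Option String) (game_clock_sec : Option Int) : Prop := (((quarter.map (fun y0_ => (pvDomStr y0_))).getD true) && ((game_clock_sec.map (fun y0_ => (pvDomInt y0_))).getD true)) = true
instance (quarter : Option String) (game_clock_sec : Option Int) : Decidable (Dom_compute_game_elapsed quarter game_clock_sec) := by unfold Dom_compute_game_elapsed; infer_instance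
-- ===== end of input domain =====

-- B replaces the quarter_order/quarter_duration helpers and the prior-quarters loop with one
-- inline classification and the closed form (q_idx - 1) * 900; objective: simpler.


-- ===== PORT A =====
def quarter_order (quarter : String) : Int :=
  if quarter = "OT" then 5
  else if (!(quarter == "")) && PySem.Str.startswith quarter "Q" &&
          (PySem.Str.len quarter == 2) &&
          (match PySem.Str.pyGet? quarter 1 with
           | some c => PySem.Str.isIn (String.ofList [c]) "1234"
           | none => false) then
    -- int(quarter[1]); the guard guarantees the digit parses, so the ValueError branch is unreachable
    match PySem.Str.pyGet? quarter 1 with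
    | some c => (PySem.Int.ofStr? (String.ofList [c])).getD 0
    | none => 0
  else 0

def quarter_duration_seconds (quarter : String) : Int :=
  if quarter = "OT" then 10 * 60 else 15 * 60

def compute_game_elapsed (quarter : Option String) (game_clock_sec : Option Int) : Option Int :=
  match quarter, game_clock_sec with
  | some q, some g =>
    if q = "" then none
    else
      let q_idx := quarter_order q
      if q_idx = 0 then none
      else
        let elapsed_prior :=
          (PySem.List.pyRange 1 q_idx 1).foldl
            (fun acc i => acc + quarter_duration_seconds ("Q" ++ PySem.Int.toStr i)) 0
        let elapsed_this := quarter_duration_seconds q - g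
        some (elapsed_prior + max 0 elapsed_this)
  | _, _ => none

-- ===== PORT B =====
def compute_game_elapsed_alt (quarter : Option String) (game_clock_sec : Option Int) : Option Int :=
  quarter.bind fun q =>
  game_clock_sec.bind fun g =>
    if q = "" then none
    else if q = "OT" then
      some ((5 - 1) * 15 * 60 + max 0 (10 * 60 - g))
    else
      -- len(quarter) == 2 is the two-element list pattern; int(quarter[1]) on a digit is c1.toNat - '0'.toNat
      match q.toList with
      | [c0, c1] =>
        if c0 = 'Q' ∧ (c1 = '1' ∨ c1 = '2' ∨ c1 = '3' ∨ c1 = '4') then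
          some (((c1.toNat : Int) - ('0'.toNat : Int) - 1) * 15 * 60 + max 0 (15 * 60 - g))
        else none
      | _ => none

-- ===== PRECONDITION & SPEC =====
def Spec_compute_game_elapsed (quarter : Option String) (game_clock_sec : Option Int) (out : Option Int) : Prop := out = compute_game_elapsed_alt quarter game_clock_sec
instance (quarter : Option String) (game_clock_sec : Option Int) (out : Option Int) : Decidable (Spec_compute_game_elapsed quarter game_clock_sec out) := by unfold Spec_compute_game_elapsed; infer_instance

-- ===== CLAIM (what is proved, stated in full; the proofs are below) =====
def Claim_equal_compute_game_elapsed : Prop := ∀ (quarter : Option String) (game_clock_sec : Option Int), Dom_compute_game_elapsed quarter game_clock_sec → Spec_compute_game_elapsed quarter game_clock_sec (compute_game_elapsed quarter game_clock_sec)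

-- ===== LEMMAS AND PROOFS =====

-- ===== VERDICT (by name: the statement is the Claim_ definition above) =====
theorem compute_game_elapsed_spec : Claim_equal_compute_game_elapsed := by
  intro quarter game_clock_sec _
  unfold Spec_compute_game_elapsed
  cases quarter with
  | none => rfl
  | some q =>
    cases game_clock_sec with
    | none => rfl
    | some g =>
      by_cases hq : q = ""
      · subst hq; simp [compute_game_elapsed, compute_game_elapsed_alt]
      by_cases hOT : q = "OT"
      · subst hOT
        have hfold : (PySem.List.pyRange 1 5 1).foldl
            (fun acc i => acc + quarter_duration_seconds ("Q" ++ PySem.Int.toStr i)) 0 = 3600 := by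
          decide
        simp [compute_game_elapsed, compute_game_elapsed_alt,
          show quarter_order "OT" = 5 from rfl, show quarter_duration_seconds "OT" = 600 from rfl,
          hfold]
      · rcases hql : q.toList with _ | ⟨c0, _ | ⟨c1, _ | ⟨c2, rest⟩⟩⟩
        · exact absurd (by simpa using congrArg String.ofList hql) hq
        · -- length 1: both none
          have hqo : quarter_order q = 0 := by
            simp [quarter_order, hOT, hql]
          simp [compute_game_elapsed, compute_game_elapsed_alt, hq, hOT, hqo, hql]
        · -- length 2
          by_cases hc0 : c0 = 'Q'
          · subst hc0
            by_cases hd : c1 = '1' ∨ c1 = '2' ∨ c1 = '3' ∨ c1 = '4'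
            · -- a real quarter Q1..Q4
              rcases hd with h | h | h | h <;> subst h <;>
                [ (have hqs : q = "Q1" := by simpa using congrArg String.ofList hql);
                  (have hqs : q = "Q2" := by simpa using congrArg String.ofList hql);
                  (have hqs : q = "Q3" := by simpa using congrArg String.ofList hql);
                  (have hqs : q = "Q4" := by simpa using congrArg String.ofList hql)] <;>
                subst hqs
              · simp [compute_game_elapsed, compute_game_elapsed_alt,
                  show quarter_order "Q1" = 1 from by decide,
                  show quarter_duration_seconds "Q1" = 900 from rfl,
                  show "Q1".toList = ['Q','1'] from rfl]
              · have hf : (PySem.List.pyRange 1 2 1).foldl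
                    (fun acc i => acc + quarter_duration_seconds ("Q" ++ PySem.Int.toStr i)) 0 = 900 := by decide
                simp [compute_game_elapsed, compute_game_elapsed_alt,
                  show quarter_order "Q2" = 2 from by decide,
                  show quarter_duration_seconds "Q2" = 900 from rfl,
                  show "Q2".toList = ['Q','2'] from rfl, hf]
              · have hf : (PySem.List.pyRange 1 3 1).foldl
                    (fun acc i => acc + quarter_duration_seconds ("Q" ++ PySem.Int.toStr i)) 0 = 1800 := by decide
                simp [compute_game_elapsed, compute_game_elapsed_alt,
                  show quarter_order "Q3" = 3 from by decide,
                  show quarter_duration_seconds "Q3" = 900 from rfl,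
                  show "Q3".toList = ['Q','3'] from rfl, hf]
              · have hf : (PySem.List.pyRange 1 4 1).foldl
                    (fun acc i => acc + quarter_duration_seconds ("Q" ++ PySem.Int.toStr i)) 0 = 2700 := by decide
                simp [compute_game_elapsed, compute_game_elapsed_alt,
                  show quarter_order "Q4" = 4 from by decide,
                  show quarter_duration_seconds "Q4" = 900 from rfl,
                  show "Q4".toList = ['Q','4'] from rfl, hf]
            · -- second char not a quarter digit: both none
              have hqo : quarter_order q = 0 := by
                simp [quarter_order, hOT, hql, PySem.List.pyGet?, PySem.List.pyIdx?]
                intro _ _ h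
                exfalso
                have hm := (List.singleton_infix_iff c1 _).mp
                  ((PySem.Chars.isIn_iff_infix _ _).mp h)
                simp only [List.mem_cons, List.not_mem_nil, or_false] at hm
                exact hd hm
              simp [compute_game_elapsed, compute_game_elapsed_alt, hq, hOT, hqo, hql, hd]
          · -- first char not 'Q': both none
            have hqo : quarter_order q = 0 := by
              simp [quarter_order, hOT, hql, PySem.List.pyGet?, PySem.List.pyIdx?]
              intro _ hsw _
              exfalso
              have hp := (PySem.Chars.startswith_iff _ _).mp hsw
              rw [List.cons_prefix_cons] at hp
              exact hc0 hp.1.symm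
            simp [compute_game_elapsed, compute_game_elapsed_alt, hq, hOT, hqo, hql, hc0]
        · -- length ≥ 3: both none
          have hqo : quarter_order q = 0 := by
            simp [quarter_order, hOT, hql, PySem.List.pyGet?, PySem.List.pyIdx?]
            intro _ _ hlen _
            exfalso
            omega
          simp [compute_game_elapsed, compute_game_elapsed_alt, hq, hOT, hqo, hql]
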